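-- pv_equiv track=rewrite | github.com/andom25/masters_thesis_eth_zurich | preprocessing/scripts/computer_vision/image_stitching_v2.py | get_nonoverlapping_groups
-- ===== SOURCE A (Python) =====
-- def get_nonoverlapping_groups(images_dict, group_size):
--     nums = sorted(images_dict.keys())
--     groups = []
--     for i in range(0, len(nums) - group_size + 1, group_size):
--         group_nums = nums[i:i+group_size]
--         if len(group_nums) == group_size:
--             groups.append(tuple(images_dict[n] for n in group_nums))
--     return groups
-- ===== SOURCE B (Python) =====
-- def get_nonoverlapping_groups(images_dict, group_size):
--     values = [images_dict[n] for n in sorted(images_dict)]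
--     groups = []
--     while group_size > 0 and len(values) >= group_size:
--         groups.append(tuple(values[:group_size]))
--         values = values[group_size:]
--     return groups
-- ===== Notes on version B (the rewrite author's own statement) =====
-- stated objective: alternative
-- what changed: Instead of A's stride-indexed range loop with per-group slice-and-length-check over the sorted keys, B builds the sorted value list once and then consumes it destructively, repeatedly splitting off the first group_size values until fewer than group_size remain.
import Mathlib
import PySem

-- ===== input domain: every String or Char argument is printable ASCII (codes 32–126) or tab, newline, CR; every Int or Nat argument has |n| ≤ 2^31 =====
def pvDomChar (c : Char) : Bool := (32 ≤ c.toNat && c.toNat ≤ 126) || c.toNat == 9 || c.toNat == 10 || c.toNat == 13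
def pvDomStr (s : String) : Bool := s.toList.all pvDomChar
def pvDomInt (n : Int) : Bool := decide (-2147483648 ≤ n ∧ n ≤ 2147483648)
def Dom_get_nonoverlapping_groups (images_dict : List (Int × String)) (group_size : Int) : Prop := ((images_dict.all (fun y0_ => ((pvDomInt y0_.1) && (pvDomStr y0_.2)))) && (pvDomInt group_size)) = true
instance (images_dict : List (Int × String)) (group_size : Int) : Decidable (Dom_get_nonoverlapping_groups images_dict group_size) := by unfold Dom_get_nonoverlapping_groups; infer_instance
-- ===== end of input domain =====

-- B builds the sorted value list once and consumes it by repeatedly splitting off the first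
-- group_size values, instead of A's stride-indexed range loop with per-group slicing; same
-- behaviour and cost, a structurally different decomposition.

-- ===== PORT A =====
-- literal port of A: sort the dict keys, loop i over range(0, len-g+1, g), slice, check length, append
def get_nonoverlapping_groups (images_dict : List (Int × String)) (group_size : Int) : List (List String) :=
  let d := PySem.Dict.ofList images_dict
  let nums := PySem.List.sorted d.keys (fun n => n) false
  (PySem.List.pyRange 0 ((nums.length : Int) - group_size + 1) group_size).foldl
    (fun groups i =>
      let group_nums := PySem.List.slice nums (some i) (some (i + group_size))
      if (group_nums.length : Int) = group_size then
        -- images_dict[n]: n is drawn from d.keys, so get? is always some; the default is unreachable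
        groups ++ [group_nums.map (fun n => (d.get? n).getD "")]
      else groups) []

-- ===== PORT B =====
-- B's while loop: while group_size > 0 and len(values) >= group_size, split off the first
-- group_size values; for g ≤ 0 the guard fails at once — that is g.toNat = 0 below
def pvChunks (g : Nat) (xs : List String) : List (List String) :=
  if h : 0 < g ∧ g ≤ xs.length then xs.take g :: pvChunks g (xs.drop g) else []
termination_by xs.length
decreasing_by simp; omega

def get_nonoverlapping_groups_alt (images_dict : List (Int × String)) (group_size : Int) : List (List String) :=
  let d := PySem.Dict.ofList images_dict
  let values := (PySem.List.sorted d.keys (fun n => n) false).map (fun n => (d.get? n).getD "")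
  pvChunks group_size.toNat values

-- ===== PRECONDITION & SPEC =====
-- Pre_ excludes only group_size = 0, where A raises ValueError (range() step 0)
def Pre_get_nonoverlapping_groups (images_dict : List (Int × String)) (group_size : Int) : Prop :=
  group_size ≠ 0
instance (images_dict : List (Int × String)) (group_size : Int) : Decidable (Pre_get_nonoverlapping_groups images_dict group_size) := by unfold Pre_get_nonoverlapping_groups; infer_instance

def pvWitness_get_nonoverlapping_groups : (List (Int × String)) × Int := ([(1, "a"), (2, "b")], 2)

def Spec_get_nonoverlapping_groups (images_dict : List (Int × String)) (group_size : Int) (out : List (List String)) : Prop := out = get_nonoverlapping_groups_alt images_dict group_size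
instance (images_dict : List (Int × String)) (group_size : Int) (out : List (List String)) : Decidable (Spec_get_nonoverlapping_groups images_dict group_size out) := by unfold Spec_get_nonoverlapping_groups; infer_instance

-- ===== CLAIM (what is proved, stated in full; the proofs are below) =====
def Claim_equal_get_nonoverlapping_groups : Prop := ∀ (images_dict : List (Int × String)) (group_size : Int), Dom_get_nonoverlapping_groups images_dict group_size → Pre_get_nonoverlapping_groups images_dict group_size → Spec_get_nonoverlapping_groups images_dict group_size (get_nonoverlapping_groups images_dict group_size)


-- ===== LEMMAS AND PROOFS =====

-- closed form of the grouper: the k-th chunk is take g of drop (g*k)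
lemma pvChunks_closed (g : Nat) (hg : 0 < g) :
    ∀ (N : Nat) (xs : List String), xs.length ≤ N →
      pvChunks g xs = (List.range (xs.length / g)).map (fun k => (xs.drop (g * k)).take g) := by
  intro N
  induction N with
  | zero =>
      intro xs hx
      have hxs : xs = [] := List.eq_nil_of_length_eq_zero (Nat.le_zero.mp hx)
      subst hxs
      rw [pvChunks]
      simp [Nat.div_eq_of_lt hg]
      omega
  | succ N ih =>
      intro xs hx
      by_cases h : g ≤ xs.length
      · rw [pvChunks]
        rw [dif_pos ⟨hg, h⟩]
        have hlen : (xs.drop g).length = xs.length - g := by simp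
        have hrec := ih (xs.drop g) (by simp; omega)
        rw [hrec, hlen]
        have hdiv : xs.length / g = (xs.length - g) / g + 1 := Nat.div_eq_sub_div hg h
        rw [hdiv, List.range_succ_eq_map]
        simp only [List.map_cons, List.map_map]
        congr 1
        apply List.map_congr_left
        intro k _
        simp only [Function.comp, List.drop_drop, Nat.succ_eq_add_one]
        have he : g + g * k = g * (k + 1) := by ring
        rw [he]
      · rw [pvChunks]
        rw [dif_neg (by omega)]
        have : xs.length / g = 0 := Nat.div_eq_of_lt (by omega)
        simp [this]

-- A's stride-g index loop over the sorted keys computes exactly the chunking of the mapped list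
lemma loopA_eq_chunks (g : Nat) (hg : 0 < g) (nums : List Int) (f : Int → String) :
    (PySem.List.pyRange 0 ((nums.length : Int) - (g : Int) + 1) (g : Int)).foldl
      (fun groups i =>
        let group_nums := PySem.List.slice nums (some i) (some (i + (g : Int)))
        if (group_nums.length : Int) = (g : Int) then
          groups ++ [group_nums.map f]
        else groups) []
    = pvChunks g (nums.map f) := by
  have hgZ : (0 : Int) < (g : Int) := by exact_mod_cast hg
  set L := nums.length with hL
  -- the range is the first L/g multiples of g
  have hcount : PySem.List.pyRange 0 ((L : Int) - (g : Int) + 1) (g : Int)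
      = (List.range (L / g)).map (fun k => ((g * k : Nat) : Int)) := by
    rw [PySem.List.pyRange_of_pos _ _ hgZ]
    have harg : ((L : Int) - g + 1 - 0 + g - 1) = (L : Int) := by ring
    by_cases hb : (0 : Int) < (L : Int) - g + 1
    · rw [if_pos hb, harg]
      have : ((L : Int) / (g : Int)).toNat = L / g := by
        rw [← Int.natCast_div]; exact Int.toNat_natCast _
      rw [this]
      apply List.map_congr_left
      intro k _
      push_cast; ring
    · rw [if_neg hb]
      have hlt : L < g := by omega
      rw [Nat.div_eq_of_lt hlt]
      simp
  rw [hcount, List.foldl_map]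
  -- every group in the range has full length g, so the if always appends
  have hfull : ∀ k, k ∈ List.range (L / g) →
      (PySem.List.slice nums (some ((g * k : Nat) : Int))
        (some (((g * k : Nat) : Int) + (g : Int)))).length = g := by
    intro k hk
    have hk' : k < L / g := List.mem_range.mp hk
    have hub : g * k + g ≤ L := by
      have h1 : k + 1 ≤ L / g := hk'
      have h2 : (k + 1) * g ≤ (L / g) * g := Nat.mul_le_mul_right g h1
      have h3 : (L / g) * g ≤ L := Nat.div_mul_le_self L g
      calc g * k + g = (k + 1) * g := by ring
        _ ≤ (L / g) * g := h2
        _ ≤ L := h3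
    have : (((g * k : Nat) : Int) + (g : Int)) = ((g * k + g : Nat) : Int) := by push_cast; ring
    rw [this, PySem.List.length_slice, PySem.List.clampIdx_natCast, PySem.List.clampIdx_natCast]
    have e1 : min (g * k + g) L = g * k + g := by omega
    have e2 : min (g * k) L = g * k := by omega
    rw [e1, e2]; omega
  have hstep : ∀ (acc : List (List String)), ∀ k ∈ List.range (L / g),
      (fun groups k =>
        let group_nums := PySem.List.slice nums (some ((g * k : Nat) : Int))
          (some (((g * k : Nat) : Int) + (g : Int)))
        if (group_nums.length : Int) = (g : Int) then groups ++ [group_nums.map f] else groups) acc k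
      = acc ++ [(PySem.List.slice nums (some ((g * k : Nat) : Int))
          (some (((g * k : Nat) : Int) + (g : Int)))).map f] := by
    intro acc k hk
    simp only
    rw [if_pos (by exact_mod_cast hfull k hk)]
  rw [PySem.List.foldl_congr_mem _ _ _ _ hstep]
  rw [PySem.List.foldl_append_singleton_eq_map]
  rw [pvChunks_closed g hg (nums.map f).length (nums.map f) le_rfl]
  simp only [List.length_map]
  rw [List.nil_append]
  apply List.map_congr_left
  intro k _
  have : ((g * k : Nat) : Int) + (g : Int) = ((g * k : Nat) : Int) + ((g : Nat) : Int) := by norm_cast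
  rw [this, PySem.List.slice_natCast_add, List.map_take, List.map_drop]

-- ===== VERDICT (by name: the statement is the Claim_ definition above) =====
theorem get_nonoverlapping_groups_spec : Claim_equal_get_nonoverlapping_groups := by
  intro images_dict group_size _ hpre
  unfold Spec_get_nonoverlapping_groups
  unfold get_nonoverlapping_groups get_nonoverlapping_groups_alt
  simp only []
  set d := PySem.Dict.ofList images_dict
  set nums := PySem.List.sorted d.keys (fun n => n) false with hnums
  rcases lt_trichotomy group_size 0 with hneg | hzero | hpos
  · -- negative step: empty range on A's side, toNat = 0 on B's side
    have hr : PySem.List.pyRange 0 ((nums.length : Int) - group_size + 1) group_size = [] := by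
      unfold PySem.List.pyRange
      rw [if_neg (by omega)]
      rw [if_neg (by omega), if_neg (by omega)]
      simp
    have ht : group_size.toNat = 0 := by omega
    rw [hr, ht, pvChunks]
    simp
  · exact absurd hzero hpre
  · have ⟨g, hgeq⟩ : ∃ g : Nat, group_size = (g : Int) := ⟨group_size.toNat, by omega⟩
    subst hgeq
    have hg : 0 < g := by exact_mod_cast hpos
    rw [Int.toNat_natCast]
    exact loopA_eq_chunks g hg nums (fun n => (d.get? n).getD "")
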